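-- pv_equiv track=rewrite | github.com/ksaubhri12/ds_algo | practice_450/array/04_move_negative_element.py | move_negative_element
-- ===== SOURCE A (Python) =====
-- def move_negative_element(arr: [], n):
--     positive_arr = []
--     negative_arr = []
--
--     for i in range(0, n):
--         element = arr[i]
--         if element < 0:
--             negative_arr.append(element)
--         else:
--             positive_arr.append(element)
--
--     for i in range(0, len(negative_arr)):
--         positive_arr.append(negative_arr[i])
--
--     return positive_arr
-- ===== SOURCE B (Python) =====
-- def move_negative_element(arr: [], n):
--     xs = [arr[i] for i in range(0, n)]
--     return sorted(xs, key=lambda x: x < 0)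
-- ===== Notes on version B (the rewrite author's own statement) =====
-- stated objective: simpler
-- what changed: Replaces the two-accumulator partition loop plus explicit concatenation loop with a single stable sort on the boolean key x < 0 (non-negatives sort first, order preserved within each group).
import Mathlib
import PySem

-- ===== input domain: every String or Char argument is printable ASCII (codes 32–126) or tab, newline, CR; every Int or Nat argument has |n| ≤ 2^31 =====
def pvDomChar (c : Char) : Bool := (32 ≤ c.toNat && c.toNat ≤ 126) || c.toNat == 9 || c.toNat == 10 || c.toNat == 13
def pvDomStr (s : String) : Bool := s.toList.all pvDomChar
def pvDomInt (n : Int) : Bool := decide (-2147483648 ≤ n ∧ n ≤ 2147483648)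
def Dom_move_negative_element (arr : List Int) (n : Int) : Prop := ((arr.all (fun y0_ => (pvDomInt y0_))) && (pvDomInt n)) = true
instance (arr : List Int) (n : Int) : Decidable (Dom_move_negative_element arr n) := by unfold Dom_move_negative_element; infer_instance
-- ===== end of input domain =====

-- B replaces A's two-accumulator partition loop with a single stable sort on the key x < 0 (simpler, same result).


-- ===== PORT A =====
def move_negative_element (arr : List Int) (n : Int) : List Int :=
  -- the first loop carries the pair (positive_arr, negative_arr)
  let s := (PySem.List.pyRange 0 n 1).foldl
    (fun (acc : List Int × List Int) i =>
      let element := PySem.List.pyGetD arr i 0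
      if element < 0 then (acc.1, acc.2 ++ [element]) else (acc.1 ++ [element], acc.2))
    ([], [])
  -- second loop appends negative_arr element by element onto positive_arr
  (PySem.List.pyRange 0 (s.2.length : Int) 1).foldl
    (fun acc i => acc ++ [PySem.List.pyGetD s.2 i 0]) s.1

-- ===== PORT B =====
def move_negative_element_alt (arr : List Int) (n : Int) : List Int :=
  let xs := (PySem.List.pyRange 0 n 1).map (fun i => PySem.List.pyGetD arr i 0)
  PySem.List.sorted xs (fun x => decide (x < 0)) false

-- ===== PRECONDITION & SPEC =====
-- Pre_ excludes exactly n > len(arr), where the Python A (and B) raise IndexError on arr[i].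
def Pre_move_negative_element (arr : List Int) (n : Int) : Prop := n ≤ (arr.length : Int)
instance (arr : List Int) (n : Int) : Decidable (Pre_move_negative_element arr n) := by
  unfold Pre_move_negative_element; infer_instance
def pvWitness_move_negative_element : List Int × Int := ([1, -2, 3, -4], 4)
def Spec_move_negative_element (arr : List Int) (n : Int) (out : List Int) : Prop := out = move_negative_element_alt arr n
instance (arr : List Int) (n : Int) (out : List Int) : Decidable (Spec_move_negative_element arr n out) := by unfold Spec_move_negative_element; infer_instance

-- ===== CLAIM (what is proved, stated in full; the proofs are below) =====
def Claim_equal_move_negative_element : Prop := ∀ (arr : List Int) (n : Int), Dom_move_negative_element arr n → Pre_move_negative_element arr n → Spec_move_negative_element arr n (move_negative_element arr n)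

-- ===== LEMMAS AND PROOFS =====

-- A's first loop: the fold over the index range is a stable partition of the selected
-- elements (accumulators generalized).
theorem pv_partition_foldl (arr : List Int) (idx : List Int) (p q : List Int) :
    idx.foldl (fun (acc : List Int × List Int) i =>
        let element := PySem.List.pyGetD arr i 0
        if element < 0 then (acc.1, acc.2 ++ [element]) else (acc.1 ++ [element], acc.2)) (p, q)
      = (p ++ (idx.map (fun i => PySem.List.pyGetD arr i 0)).filter (fun x => !decide (x < 0)),
         q ++ (idx.map (fun i => PySem.List.pyGetD arr i 0)).filter (fun x => decide (x < 0))) := by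
  induction idx generalizing p q with
  | nil => simp
  | cons i t ih =>
    by_cases hx : PySem.List.pyGetD arr i 0 < 0 <;>
      simp [List.foldl_cons, hx, ih]

-- appending a list element by element
theorem pv_foldl_append (ys : List Int) (init : List Int) :
    ys.foldl (fun acc x => acc ++ [x]) init = init ++ ys := by
  induction ys generalizing init with
  | nil => simp
  | cons y t ih => simp [List.foldl_cons, ih]

-- insertBy skips a prefix it is never inserted before
theorem pv_insertBy_append (before : Int → Int → Bool) (x : Int) (P N : List Int)
    (h : ∀ p ∈ P, before x p = false) :
    PySem.List.insertBy before x (P ++ N) = P ++ PySem.List.insertBy before x N := by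
  induction P with
  | nil => simp
  | cons p t ih =>
    have hp : before x p = false := h p (by simp)
    simp [PySem.List.insertBy, hp, ih (fun q hq => h q (by simp [hq]))]

-- the stable sort by the key (x < 0) IS the stable partition
theorem pv_sorted_partition (xs : List Int) :
    PySem.List.sorted xs (fun x => decide (x < 0)) false
      = xs.filter (fun x => !decide (x < 0)) ++ xs.filter (fun x => decide (x < 0)) := by
  induction xs using List.reverseRecOn with
  | nil => rfl
  | append_singleton t x ih =>
    have hfold : PySem.List.sorted (t ++ [x]) (fun x => decide (x < 0)) false
        = PySem.List.insertBy
            (fun a b => decide ((decide (a < 0) : Bool) < (decide (b < 0) : Bool))) x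
            (PySem.List.sorted t (fun x => decide (x < 0)) false) := by
      simp [PySem.List.sorted, List.foldl_append]
    rw [hfold, ih]
    by_cases hx : x < 0
    · -- key x = true: never inserted before anything, goes to the very end
      rw [PySem.List.insertBy_of_forall_not_before]
      · simp [List.filter_append, hx]
      · intro y _; simp [hx]
    · -- key x = false: skips the non-negative prefix, lands before the negatives
      rw [pv_insertBy_append _ _ _ _
        (by intro p hp
            have h0 := List.of_mem_filter hp
            simp at h0
            simp [hx, not_lt.mpr h0])]
      cases hN : t.filter (fun x => decide (x < 0)) with
      | nil => simp [PySem.List.insertBy, List.filter_append, hx, hN]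
      | cons q r =>
        have hq : q < 0 := by
          have := List.of_mem_filter (a := q) (l := t) (p := fun x => decide (x < 0))
            (by rw [hN]; simp)
          simpa using this
        simp [PySem.List.insertBy, hq, hx, List.filter_append, hN]

-- ===== VERDICT (by name: the statement is the Claim_ definition above) =====
theorem move_negative_element_spec : Claim_equal_move_negative_element := by
  intro arr n _ _
  unfold Spec_move_negative_element move_negative_element move_negative_element_alt
  rw [pv_sorted_partition, pv_partition_foldl]
  rw [PySem.List.foldl_pyRange_zero_pyGetD' _ 0 (fun acc x => acc ++ [x])]
  exact pv_foldl_append _ _
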